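-- pv_equiv track=rewrite | github.com/Vagacoder/Python_for_everyone | Ch11/p11_12.py | subString1
-- ===== SOURCE A (Python) =====
-- def subString(inputString):
--     listOfSubString = list()
--     if len(inputString) <= 0:
--         listOfSubString.append(inputString)
--
--     else:
--         listOfSubString = subStringOfFirstLetter(inputString)
--         returnedList = subString(inputString[1:])
--         for str1 in returnedList:
--             listOfSubString.append(str1)
--
--     return listOfSubString
--
-- def subStringOfFirstLetter(inputString):
--     listOfSubString = list()
--
--     for i in range(1, len(inputString)+1):
--         listOfSubString.append(inputString[:i])
--
--     return listOfSubString
--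
-- def subString1(inputString):
--     listOfSubString = list()
--     if len(inputString) <= 0:
--         listOfSubString.append(inputString)
--
--     else:
--         for i in range(1, len(inputString) + 1):
--             listOfSubString.append(inputString[:i])
--         returnedList = subString(inputString[1:])
--         for str1 in returnedList:
--             listOfSubString.append(str1)
--
--     return listOfSubString
-- ===== SOURCE B (Python) =====
-- def subString1(inputString):
--     n = len(inputString)
--     if n <= 0:
--         return [inputString]
--     result = [inputString[i:j] for i in range(n) for j in range(i + 1, n + 1)]
--     result.append(inputString[n:])
--     return result
-- ===== Notes on version B (the rewrite author's own statement) =====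
-- stated objective: faster
-- what changed: Replaces the recursion-over-suffixes plus prefix-helper with a single iterative nested comprehension over (i, j) slice pairs, appending the one trailing empty slice directly.
import Mathlib
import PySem

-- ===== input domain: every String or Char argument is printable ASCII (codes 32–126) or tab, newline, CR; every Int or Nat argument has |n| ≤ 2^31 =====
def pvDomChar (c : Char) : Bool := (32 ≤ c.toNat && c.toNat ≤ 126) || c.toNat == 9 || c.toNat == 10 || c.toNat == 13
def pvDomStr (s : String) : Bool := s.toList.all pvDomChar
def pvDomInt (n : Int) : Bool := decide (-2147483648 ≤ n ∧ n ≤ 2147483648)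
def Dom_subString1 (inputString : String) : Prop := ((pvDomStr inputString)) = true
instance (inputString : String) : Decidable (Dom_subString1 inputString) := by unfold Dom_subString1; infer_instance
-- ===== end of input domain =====

-- B replaces A's recursion-over-suffixes plus prefix-helper by a single nested
-- iteration over slice pairs (i, j) plus the one trailing empty slice (idiomatic).


-- ===== PORT A =====
-- helper subStringOfFirstLetter: for i in range(1, len+1): append inputString[:i]
def prefA (cs : List Char) : List (List Char) :=
  (PySem.List.pyRange 1 ((cs.length : Int) + 1) 1).foldl
    (fun acc i => acc ++ [PySem.List.slice cs none (some i)]) []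

-- helper subString: recursion; inputString[1:] is the tail of a nonempty list
-- (PySem.List.slice_from_one), and the len(inputString) <= 0 test is the match on [].
def subA : List Char → List (List Char)
  | [] => [[]]
  | c :: rest => (subA rest).foldl (fun acc s => acc ++ [s]) (prefA (c :: rest))

def subString1 (inputString : String) : List String :=
  match h : inputString.toList with
  | [] => [inputString]
  | _ :: rest =>
    -- for i in range(1, len+1): append inputString[:i]
    let listOfSubString :=
      (PySem.List.pyRange 1 ((inputString.toList.length : Int) + 1) 1).foldl
        (fun acc i => acc ++ [String.mk (PySem.List.slice inputString.toList none (some i))]) []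
    -- for str1 in subString(inputString[1:]): append str1
    (subA rest).foldl (fun acc t => acc ++ [String.mk t]) listOfSubString

-- ===== PORT B =====
def subString1_alt (inputString : String) : List String :=
  let cs := inputString.toList
  let n := cs.length
  if n ≤ 0 then [inputString]
  else
    ((PySem.List.pyRange 0 (n : Int) 1).flatMap (fun i =>
        (PySem.List.pyRange (i + 1) ((n : Int) + 1) 1).map (fun j =>
          String.mk (PySem.List.slice cs (some i) (some j)))))
      ++ [String.mk (PySem.List.slice cs (some (n : Int)) none)]

-- ===== PRECONDITION & SPEC =====
def Spec_subString1 (inputString : String) (out : List String) : Prop := out = subString1_alt inputString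
instance (inputString : String) (out : List String) : Decidable (Spec_subString1 inputString out) := by unfold Spec_subString1; infer_instance

-- ===== CLAIM (what is proved, stated in full; the proofs are below) =====
def Claim_equal_subString1 : Prop := ∀ (inputString : String), Dom_subString1 inputString → Spec_subString1 inputString (subString1 inputString)

-- ===== LEMMAS AND PROOFS =====

-- the canonical substring list both programs produce, on the char-list level
def canon (cs : List Char) : List (List Char) :=
  ((List.range cs.length).flatMap (fun i =>
    (List.range (cs.length - i)).map (fun t => (cs.drop i).take (t + 1)))) ++ [[]]

theorem prefA_eq (cs : List Char) :
    prefA cs = (List.range cs.length).map (fun t => cs.take (t + 1)) := by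
  unfold prefA
  rw [PySem.List.pyRange_one, PySem.List.foldl_append_singleton_eq_map, List.map_map]
  have h : ((cs.length : Int) + 1 - 1).toNat = cs.length := by omega
  rw [h]
  apply List.map_congr_left
  intro k _
  show PySem.List.slice cs none (some ((1 : Int) + (k : Int))) = List.take (k + 1) cs
  have h2 : (1 : Int) + (k : Int) = ((k + 1 : Nat) : Int) := by push_cast; ring
  rw [h2, PySem.List.slice_to_natCast]

theorem subA_eq_canon : ∀ cs : List Char, subA cs = canon cs := by
  intro cs
  induction cs with
  | nil => simp [subA, canon]
  | cons c rest ih =>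
    rw [subA, PySem.List.foldl_append_singleton, ih, prefA_eq, canon, canon]
    simp only [List.length_cons]
    conv_rhs => rw [List.range_succ_eq_map, List.flatMap_cons, List.flatMap_map]
    simp only [List.drop_zero, Nat.sub_zero, List.append_assoc]
    congr 1
    apply congrArg (· ++ [[]])
    apply List.flatMap_congr
    intro i _
    simp [Nat.succ_sub_succ]

theorem innerB_eq (cs : List Char) (i : Nat) (hi : i < cs.length) :
    (PySem.List.pyRange ((i : Int) + 1) ((cs.length : Int) + 1) 1).map
      (fun j => PySem.List.slice cs (some (i : Int)) (some j))
    = (List.range (cs.length - i)).map (fun t => (cs.drop i).take (t + 1)) := by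
  rw [PySem.List.pyRange_one, List.map_map]
  have h : ((cs.length : Int) + 1 - ((i : Int) + 1)).toNat = cs.length - i := by omega
  rw [h]
  apply List.map_congr_left
  intro k _
  have h1 : (i : Int) + 1 + (k : Int) = ((i + (k + 1) : Nat) : Int) := by push_cast; ring
  simp only [Function.comp, h1]
  rw [PySem.List.slice_natCast]
  congr 1
  omega

theorem main_eq (s : String) : subString1 s = subString1_alt s := by
  unfold subString1 subString1_alt
  cases h : s.toList with
  | nil => simp [h]
  | cons c rest =>
    simp only [h, List.length_cons]
    rw [if_neg (by omega)]
    rw [PySem.List.foldl_append_singleton_eq_map, PySem.List.foldl_append_singleton_eq_map,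
      List.nil_append]
    have hpref : (PySem.List.pyRange 1 (((rest.length + 1 : Nat) : Int) + 1) 1).map
          (fun i => String.mk (PySem.List.slice (c :: rest) none (some i)))
        = (prefA (c :: rest)).map String.mk := by
      rw [prefA, PySem.List.foldl_append_singleton_eq_map, List.nil_append, List.map_map]
      rfl
    have hA : subA (c :: rest) = prefA (c :: rest) ++ subA rest := by
      rw [subA, PySem.List.foldl_append_singleton]
    rw [hpref, ← List.map_append, ← hA, subA_eq_canon]
    have hlast : PySem.List.slice (c :: rest) (some ((rest.length + 1 : Nat) : Int)) none
        = ([] : List Char) := by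
      rw [PySem.List.slice_from_natCast]
      simp
    have hflat : (PySem.List.pyRange 0 (((rest.length + 1 : Nat) : Int)) 1).flatMap (fun i =>
          (PySem.List.pyRange (i + 1) (((rest.length + 1 : Nat) : Int) + 1) 1).map (fun j =>
            String.mk (PySem.List.slice (c :: rest) (some i) (some j))))
        = ((List.range (rest.length + 1)).flatMap (fun i =>
            (List.range (rest.length + 1 - i)).map (fun t =>
              ((c :: rest).drop i).take (t + 1)))).map String.mk := by
      rw [PySem.List.pyRange_one]
      have h0 : (((rest.length + 1 : Nat) : Int) - 0).toNat = rest.length + 1 := by omega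
      rw [h0, List.flatMap_map, List.map_flatMap]
      apply List.flatMap_congr
      intro i hi
      rw [List.mem_range] at hi
      have hz : (0 : Int) + (i : Int) = (i : Int) := by ring
      simp only [hz]
      have := innerB_eq (c :: rest) i (by simpa using hi)
      simp only [List.length_cons] at this
      push_cast at this ⊢
      rw [← this, List.map_map]
      rfl
    rw [hflat, hlast, canon]
    simp only [List.length_cons, List.map_append, List.map_cons, List.map_nil]

-- ===== VERDICT (by name: the statement is the Claim_ definition above) =====
theorem subString1_spec : Claim_equal_subString1 := by
  intro s _
  unfold Spec_subString1
  exact main_eq s
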